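-- pv_equiv track=rewrite | github.com/Sathishr424/LeetcodeProblems | 4000-CountBowlSubarrays/4000-CountBowlSubarrays.py | bowlSubarrays
-- ===== SOURCE A (Python) =====
-- from typing import List
--
-- def bowlSubarrays(nums: List[int]) -> int:
--     n = len(nums)
--     count = 0
--
--     stack = []
--     for i in range(n):
--         while stack and nums[stack[-1]] < nums[i]:
--             index = stack.pop()
--             if i - index + 1 >= 3:
--                 count += 1
--
--         if stack and i - stack[-1] + 1 >= 3:
--             count += 1
--         stack.append(i)
--
--     return count
-- ===== SOURCE B (Python) =====
-- from typing import List
--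
-- def bowlSubarrays(nums: List[int]) -> int:
--     # Closed form: every adjacent pair of "visible" indices except strict
--     # prefix maxima and suffix maxima contributes one bowl.
--     n = len(nums)
--     if n == 0:
--         return 0
--     p = 0  # strict prefix maxima
--     best = None
--     for x in nums:
--         if best is None or x > best:
--             p += 1
--             best = x
--     s = 0  # suffix maxima (ties count)
--     best = None
--     for x in reversed(nums):
--         if best is None or x >= best:
--             s += 1
--             best = x
--     return n - p - s + 1
-- ===== Notes on version B (the rewrite author's own statement) =====
-- stated objective: simpler
-- what changed: Replaces the monotonic-stack pair counting with a closed form: two running-max passes count strict prefix maxima P and (tie-inclusive) suffix maxima S, and the answer is n - P - S + 1 (0 for empty input); this avoids the stack entirely (constant-factor speedup, measured ~2x).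
import Mathlib
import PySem

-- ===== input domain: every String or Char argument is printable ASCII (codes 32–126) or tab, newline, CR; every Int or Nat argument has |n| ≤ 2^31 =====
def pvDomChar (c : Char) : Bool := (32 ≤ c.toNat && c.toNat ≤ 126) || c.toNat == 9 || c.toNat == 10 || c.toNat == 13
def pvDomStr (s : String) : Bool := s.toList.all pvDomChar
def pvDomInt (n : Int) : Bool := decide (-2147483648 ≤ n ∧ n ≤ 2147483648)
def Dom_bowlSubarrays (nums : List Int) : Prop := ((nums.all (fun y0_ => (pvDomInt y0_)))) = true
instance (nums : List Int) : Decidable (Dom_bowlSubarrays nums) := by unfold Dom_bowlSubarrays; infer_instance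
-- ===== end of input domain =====

-- B replaces A's monotonic-stack pair counting with a closed form from two running-max passes.

-- ===== PORT A =====
-- the inner 'while stack and nums[stack[-1]] < nums[i]' loop (stack head = Python stack[-1])
def pvPopA (nums : List Int) (i : Int) : List Int → Int → List Int × Int
  | [], count => ([], count)
  | top :: rest, count =>
    if PySem.List.pyGetD nums top 0 < PySem.List.pyGetD nums i 0 then
      pvPopA nums i rest (if i - top + 1 ≥ 3 then count + 1 else count)
    else (top :: rest, count)

-- one iteration of A's 'for i in range(n)' body; state = (stack, count)
def pvStepA (nums : List Int) (st : List Int × Int) (i : Int) : List Int × Int :=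
  let r := pvPopA nums i st.1 st.2
  let count :=
    match r.1 with
    | [] => r.2
    | top :: _ => if i - top + 1 ≥ 3 then r.2 + 1 else r.2
  (i :: r.1, count)

-- indices are always in range in A, so nums[...] is ported as pyGetD with default 0
def bowlSubarrays (nums : List Int) : Int :=
  ((PySem.List.pyRange 0 nums.length 1).foldl (pvStepA nums) ([], 0)).2

-- ===== PORT B =====
-- one step of B's forward pass: state = (p, best); counts x with x > best (strict prefix maxima)
def pvPrefStep (st : Int × Option Int) (x : Int) : Int × Option Int :=
  match st.2 with
  | none => (st.1 + 1, some x)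
  | some b => if x > b then (st.1 + 1, some x) else st

-- one step of B's backward pass: counts x with x ≥ best (suffix maxima, ties included)
def pvSufStep (st : Int × Option Int) (x : Int) : Int × Option Int :=
  match st.2 with
  | none => (st.1 + 1, some x)
  | some b => if x ≥ b then (st.1 + 1, some x) else st

def bowlSubarrays_alt (nums : List Int) : Int :=
  if nums = [] then 0
  else
    let p := (nums.foldl pvPrefStep (0, none)).1
    let s := (nums.reverse.foldl pvSufStep (0, none)).1
    (nums.length : Int) - p - s + 1

-- ===== PRECONDITION & SPEC =====
def Spec_bowlSubarrays (nums : List Int) (out : Int) : Prop := out = bowlSubarrays_alt nums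
instance (nums : List Int) (out : Int) : Decidable (Spec_bowlSubarrays nums out) := by unfold Spec_bowlSubarrays; infer_instance

-- ===== CLAIM (what is proved, stated in full; the proofs are below) =====
def Claim_equal_bowlSubarrays : Prop := ∀ (nums : List Int), Dom_bowlSubarrays nums → Spec_bowlSubarrays nums (bowlSubarrays nums)

-- ===== LEMMAS AND PROOFS =====

-- value at an index (the lookup both ports perform)
def pvVal (nums : List Int) (j : Int) : Int := PySem.List.pyGetD nums j 0

-- running maximum of a list, seeded by an optional initial value
def pvMax : Option Int → List Int → Option Int
  | o, [] => o
  | none, x :: l => pvMax (some x) l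
  | some b, x :: l => pvMax (some (max b x)) l

-- the elements B's backward pass counts (running-max survivors with ≥)
def pvSM : Option Int → List Int → List Int
  | _, [] => []
  | none, x :: r => x :: pvSM (some x) r
  | some b, x :: r => if x ≥ b then x :: pvSM (some x) r else pvSM (some b) r

-- A's loop state after the first m iterations
def pvAState (nums : List Int) (m : Nat) : List Int × Int :=
  ((PySem.List.pyRange 0 (m : Int) 1).foldl (pvStepA nums) ([], 0))

-- the loop invariant tying A's stack/count to B's two counts
def pvInv (nums : List Int) (m : Nat) (stack : List Int) (count : Int) : Prop :=
  (∀ j ∈ stack, ∃ k : Nat, j = (k : Int) ∧ k < m) ∧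
  stack.head? = some ((m : Int) - 1) ∧
  stack.Pairwise (· > ·) ∧
  stack.Pairwise (fun a b => pvVal nums a ≤ pvVal nums b) ∧
  (∀ k : Nat, k < m → ∃ j ∈ stack, pvVal nums (k : Int) ≤ pvVal nums j) ∧
  stack.map (pvVal nums) = pvSM none ((nums.take m).reverse) ∧
  count = (m : Int) + 1 - stack.length - ((nums.take m).foldl pvPrefStep (0, none)).1

lemma pvPopA_spec (nums : List Int) (i : Int) :
    ∀ (stack : List Int) (count : Int),
      pvPopA nums i stack count =
        (stack.dropWhile (fun j => decide (PySem.List.pyGetD nums j 0 < PySem.List.pyGetD nums i 0)),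
         count + ((stack.takeWhile (fun j => decide (PySem.List.pyGetD nums j 0 < PySem.List.pyGetD nums i 0))).filter
           (fun j => decide (i - j + 1 ≥ 3))).length) := by
  intro stack
  induction stack with
  | nil => intro count; simp [pvPopA]
  | cons h t ih =>
    intro count
    by_cases hp : PySem.List.pyGetD nums h 0 < PySem.List.pyGetD nums i 0
    · simp only [pvPopA, if_pos hp, ih, List.dropWhile, List.takeWhile, decide_eq_true hp,
        List.filter]
      by_cases hq : i - h + 1 ≥ 3
      · simp [hq]; push_cast; ring
      · simp [hq]
    · simp [pvPopA, List.dropWhile, List.takeWhile, hp]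

lemma pvDropWhile_eq_filter {α : Type} (p : α → Bool) :
    ∀ (l : List α), l.Pairwise (fun a b => p b = true → p a = true) →
      l.dropWhile p = l.filter (fun a => !(p a)) := by
  intro l
  induction l with
  | nil => intro _; simp
  | cons h t ih =>
    intro hpw
    rw [List.pairwise_cons] at hpw
    by_cases hp : p h = true
    · rw [List.dropWhile_cons_of_pos hp, List.filter_cons_of_neg (by simp [hp]), ih hpw.2]
    · rw [List.dropWhile_cons_of_neg (by simp [hp]), List.filter_cons_of_pos (by simp [hp])]
      have : ∀ b ∈ t, (!(p b)) = true := by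
        intro b hb
        by_cases hb' : p b = true
        · exact absurd (hpw.1 b hb hb') hp
        · simp [hb']
      rw [List.filter_eq_self.mpr this]

lemma pvSM_ge : ∀ (r : List Int) (b y : Int), y ∈ pvSM (some b) r → b ≤ y := by
  intro r
  induction r with
  | nil => intro b y hy; simp [pvSM] at hy
  | cons x t ih =>
    intro b y hy
    by_cases hx : x ≥ b
    · rw [pvSM, if_pos hx] at hy
      rcases List.mem_cons.mp hy with h | h
      · omega
      · exact le_trans hx (ih x y h)
    · rw [pvSM, if_neg hx] at hy
      exact ih b y hy

lemma pvSM_some : ∀ (r : List Int) (b : Int),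
    pvSM (some b) r = (pvSM none r).filter (fun y => decide (b ≤ y)) := by
  intro r
  induction r with
  | nil => intro b; simp [pvSM]
  | cons x t ih =>
    intro b
    rw [pvSM, pvSM]
    by_cases hx : x ≥ b
    · rw [if_pos hx, List.filter_cons_of_pos (by simpa using hx)]
      congr 1
      rw [List.filter_eq_self.mpr]
      intro y hy
      simpa using le_trans hx (pvSM_ge t x y hy)
    · rw [if_neg hx, List.filter_cons_of_neg (by simpa using hx), ih x, ih b,
        List.filter_filter]
      apply List.filter_congr
      intro y hy
      by_cases h1 : b ≤ y <;> by_cases h2 : x ≤ y <;> simp [h1, h2] <;> omega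

lemma pvSuf_fold : ∀ (r : List Int) (c : Int) (o : Option Int),
    r.foldl pvSufStep (c, o) = (c + (pvSM o r).length, pvMax o r) := by
  intro r
  induction r with
  | nil => intro c o; cases o <;> simp [pvSM, pvMax]
  | cons x t ih =>
    intro c o
    rw [List.foldl_cons]
    match o with
    | none =>
      show List.foldl pvSufStep (c + 1, some x) t = _
      rw [ih, pvSM, pvMax]
      simp; ring
    | some b =>
      by_cases hx : x ≥ b
      · have : pvSufStep (c, some b) x = (c + 1, some x) := by
          simp [pvSufStep, hx]
        rw [this, ih, pvSM, if_pos hx, pvMax, max_eq_right hx]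
        simp; push_cast; ring
      · have : pvSufStep (c, some b) x = (c, some b) := by
          simp [pvSufStep]; omega
        rw [this, ih, pvSM, if_neg hx, pvMax, max_eq_left (by omega)]

lemma pvPref_snd : ∀ (l : List Int) (c : Int) (o : Option Int),
    (l.foldl pvPrefStep (c, o)).2 = pvMax o l := by
  intro l
  induction l with
  | nil => intro c o; simp [pvMax]
  | cons x t ih =>
    intro c o
    rw [List.foldl_cons]
    match o with
    | none =>
      show (List.foldl pvPrefStep (c + 1, some x) t).2 = _
      rw [ih, pvMax]
    | some b =>
      by_cases hx : x > b
      · have : pvPrefStep (c, some b) x = (c + 1, some x) := by simp [pvPrefStep, hx]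
        rw [this, ih, pvMax, max_eq_right (by omega)]
      · have : pvPrefStep (c, some b) x = (c, some b) := by simp [pvPrefStep, hx]
        rw [this, ih, pvMax, max_eq_left (by omega)]

lemma pvMax_some_bounds : ∀ (l : List Int) (b c : Int),
    pvMax (some b) l = some c → b ≤ c ∧ (∀ y ∈ l, y ≤ c) ∧ (c = b ∨ c ∈ l) := by
  intro l
  induction l with
  | nil =>
    intro b c h
    rw [pvMax] at h
    cases h
    simp
  | cons y t ih =>
    intro b c h
    rw [pvMax] at h
    obtain ⟨h1, h2, h3⟩ := ih _ _ h
    refine ⟨by omega, ?_, ?_⟩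
    · intro z hz
      rcases List.mem_cons.mp hz with rfl | hz
      · omega
      · exact h2 z hz
    · rcases h3 with h3 | h3
      · by_cases hb : b ≥ y
        · left; omega
        · right
          have hc : c = y := by omega
          exact hc ▸ List.mem_cons_self
      · right; exact List.mem_cons_of_mem _ h3

lemma pvMax_none_lt (l : List Int) (b x : Int) (h : pvMax none l = some b) :
    (b < x ↔ ∀ y ∈ l, y < x) := by
  cases l with
  | nil => rw [pvMax] at h; cases h
  | cons y t =>
    rw [pvMax] at h
    obtain ⟨h1, h2, h3⟩ := pvMax_some_bounds t y b h
    constructor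
    · intro hb z hz
      rcases List.mem_cons.mp hz with rfl | hz
      · omega
      · have := h2 z hz; omega
    · intro hall
      rcases h3 with rfl | h3
      · exact hall b List.mem_cons_self
      · exact hall b (List.mem_cons_of_mem _ h3)

lemma pvMax_none_some (l : List Int) (hl : l ≠ []) : ∃ b, pvMax none l = some b := by
  cases l with
  | nil => exact absurd rfl hl
  | cons y t =>
    rw [pvMax]
    clear hl
    induction t generalizing y with
    | nil => exact ⟨y, rfl⟩
    | cons z t ih => rw [pvMax]; exact ih _

lemma pvAState_succ (nums : List Int) (m : Nat) :
    pvAState nums (m + 1) = pvStepA nums (pvAState nums m) (m : Int) := by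
  unfold pvAState
  have h : ((m : Int) + 1) = ((m + 1 : Nat) : Int) := by push_cast; ring
  rw [← h, PySem.List.pyRange_one_succ_right (by positivity), List.foldl_append]
  simp

lemma pvMapFilter (f : Int → Int) (p : Int → Bool) :
    ∀ (l : List Int), (l.filter (fun j => p (f j))).map f = (l.map f).filter p := by
  intro l
  induction l with
  | nil => simp
  | cons h t ih =>
    by_cases hp : p (f h) <;> simp [hp, ih]

lemma pvMem_take (nums : List Int) (m k : Nat) (hk : k < m) (hm : m ≤ nums.length) :
    nums.getD k 0 ∈ nums.take m := by
  have hkl : k < nums.length := by omega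
  have h1 : nums.getD k 0 = nums[k] := List.getD_eq_getElem nums 0 hkl
  have hk2 : k < (nums.take m).length := by simp [List.length_take]; omega
  have h2 : (nums.take m)[k] = nums[k] := List.getElem_take
  rw [h1, ← h2]
  exact List.getElem_mem hk2

lemma pvStep_inv (nums : List Int) (m : Nat) (hm : 1 ≤ m) (hmn : m < nums.length)
    (stack : List Int) (count : Int) (h : pvInv nums m stack count) :
    pvInv nums (m + 1) (pvStepA nums (stack, count) (m : Int)).1
      (pvStepA nums (stack, count) (m : Int)).2 := by
  obtain ⟨hrange, hhead, hpi, hpv, hdom, hmap, hcount⟩ := h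
  have hxv : pvVal nums (m : Int) = nums.getD m 0 := by
    simp [pvVal, PySem.List.pyGetD_natCast]
  set x : Int := nums.getD m 0 with hxdef
  set p : Int → Bool := fun j => decide (PySem.List.pyGetD nums j 0 < PySem.List.pyGetD nums (m : Int) 0) with hpdef
  have hpval : ∀ j, p j = decide (pvVal nums j < x) := by
    intro j; simp [hpdef, pvVal, hxv.symm]
  -- stack is nonempty with head ↑m - 1
  obtain ⟨h0, rest, rfl⟩ : ∃ h0 rest, stack = h0 :: rest := by
    cases stack with
    | nil => simp at hhead
    | cons a t => exact ⟨a, t, rfl⟩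
  have hh0 : h0 = (m : Int) - 1 := by simpa using hhead
  -- the filtered stack
  set stack' : List Int := (h0 :: rest).filter (fun j => !(p j)) with hs'def
  have hsub' : ∀ j ∈ stack', j ∈ h0 :: rest := fun j hj => List.mem_of_mem_filter hj
  have hdw : (h0 :: rest).dropWhile p = stack' := by
    apply pvDropWhile_eq_filter
    apply hpv.imp_of_mem
    intro a b _ _ hab
    rw [hpval a, hpval b]
    simp only [decide_eq_true_eq]
    omega
  -- q holds exactly on the non-head stack elements
  have hqrest : ∀ j ∈ rest, ((m : Int) - j + 1 ≥ 3) := by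
    intro j hj
    have h1 : h0 > j := (List.pairwise_cons.mp hpi).1 j hj
    obtain ⟨k, rfl, hk⟩ := hrange j (List.mem_cons_of_mem _ hj)
    omega
  have hvge : ∀ j ∈ stack', x ≤ pvVal nums j := by
    intro j hj
    have := List.of_mem_filter hj
    rw [hpval j] at this
    simp at this
    omega
  clear_value stack' p x
  -- compute the result of pvStepA
  have hrun : pvStepA nums (h0 :: rest, count) (m : Int) =
      ((m : Int) :: stack',
        count + ((h0 :: rest).length - 1 - stack'.length : Int)
          + (if stack' = [] then 0 else 1)) := by
    have hlam : (fun j => decide (PySem.List.pyGetD nums j 0 < PySem.List.pyGetD nums (m : Int) 0)) = p :=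
      hpdef.symm
    unfold pvStepA
    rw [pvPopA_spec, hlam]
    simp only [hdw]
    by_cases hph : p h0 = true
    · -- head gets popped
      have htw : (h0 :: rest).takeWhile p = h0 :: rest.takeWhile p :=
        List.takeWhile_cons_of_pos hph
      have hfq : (((h0 :: rest).takeWhile p).filter
          (fun j => decide ((m : Int) - j + 1 ≥ 3))) = rest.takeWhile p := by
        rw [htw, List.filter_cons_of_neg (by simp; omega)]
        apply List.filter_eq_self.mpr
        intro j hj
        simp only [decide_eq_true_eq]
        exact hqrest j (List.takeWhile_subset _ hj)
      rw [hfq]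
      have hlen : (rest.takeWhile p).length + (rest.dropWhile p).length = rest.length := by
        conv_rhs => rw [← List.takeWhile_append_dropWhile (p := p) (l := rest)]
        rw [List.length_append]
      have hdwr : (h0 :: rest).dropWhile p = rest.dropWhile p :=
        List.dropWhile_cons_of_pos hph
      have hse : stack' = rest.dropWhile p := by rw [← hdw, hdwr]
      cases hcase : rest.dropWhile p with
      | nil =>
        rw [hcase] at hlen
        rw [hse, hcase]
        simp only [Prod.mk.injEq, List.length_cons, List.length_nil]
        refine ⟨trivial, ?_⟩
        simp only [List.length_nil, Nat.add_zero] at hlen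
        rw [← hlen]
        push_cast
        ring
      | cons top rtl =>
        have htop : top ∈ rest :=
          List.dropWhile_subset _ (by rw [hcase]; exact List.mem_cons_self)
        have hq : (m : Int) - top + 1 ≥ 3 := hqrest top htop
        rw [hcase] at hlen
        rw [hse, hcase]
        simp only [if_pos hq, Prod.mk.injEq]
        refine ⟨trivial, ?_⟩
        have hne : (top :: rtl : List Int) ≠ [] := by simp
        rw [if_neg hne]
        simp only [List.length_cons] at hlen ⊢
        rw [← hlen]
        push_cast
        ring
    · -- head survives: nothing is popped, top check fails
      have htw : (h0 :: rest).takeWhile p = [] :=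
        List.takeWhile_cons_of_neg (by simp [hph])
      have hdwr : (h0 :: rest).dropWhile p = h0 :: rest :=
        List.dropWhile_cons_of_neg (by simp [hph])
      have hse : stack' = h0 :: rest := by rw [← hdw, hdwr]
      rw [htw, hse]
      have hq : ¬ ((m : Int) - h0 + 1 ≥ 3) := by rw [hh0]; omega
      simp only [List.filter_nil, List.length_nil, if_neg hq, Prod.mk.injEq]
      refine ⟨trivial, ?_⟩
      have hne : (h0 :: rest : List Int) ≠ [] := by simp
      rw [if_neg hne]
      simp only [List.length_cons]
      push_cast
      ring
  rw [hrun]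
  -- take (m+1) = take m ++ [x]
  have htake : nums.take (m + 1) = nums.take m ++ [x] := by
    rw [List.take_add_one, List.getElem?_eq_getElem hmn]
    simp only [Option.toList_some, hxdef]
    rw [List.getD_eq_getElem nums 0 hmn]
  have htm_ne : nums.take m ≠ [] := by
    have : (nums.take m).length = m := by simp [List.length_take]; omega
    intro hc; rw [hc] at this; simp at this; omega
  -- P recurrence
  obtain ⟨bm, hbm⟩ := pvMax_none_some (nums.take m) htm_ne
  have hPstate : ((nums.take m).foldl pvPrefStep (0, none)).2 = some bm := by
    rw [pvPref_snd]; exact hbm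
  have hPsucc : ((nums.take (m+1)).foldl pvPrefStep (0, none)).1 =
      ((nums.take m).foldl pvPrefStep (0, none)).1 + (if stack' = [] then 1 else 0) := by
    rw [htake, List.foldl_append, List.foldl_cons, List.foldl_nil]
    have hempty : stack' = [] ↔ bm < x := by
      rw [pvMax_none_lt _ _ _ hbm]
      constructor
      · intro hse y hy
        obtain ⟨i, hi, rfl⟩ := List.mem_iff_getElem.mp hy
        have hil : i < m := by simp [List.length_take] at hi; omega
        have hyv : (nums.take m)[i] = pvVal nums (i : Int) := by
          rw [List.getElem_take]
          simp [pvVal, PySem.List.pyGetD_natCast]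
          exact (List.getD_eq_getElem nums 0 (by omega)).symm
        rw [hyv]
        obtain ⟨j, hj, hle⟩ := hdom i hil
        have hjp : p j = true := by
          have := List.filter_eq_nil_iff.mp (hs'def ▸ hse) j hj
          rw [hpval j] at this ⊢
          simpa using this
        rw [hpval j] at hjp
        simp at hjp
        omega
      · intro hall
        rw [hs'def]
        apply List.filter_eq_nil_iff.mpr
        intro j hj
        obtain ⟨k, rfl, hk⟩ := hrange j hj
        have hmem : nums.getD k 0 ∈ nums.take m := pvMem_take nums m k hk (by omega)
        have := hall _ hmem
        rw [List.getD_eq_getElem?_getD] at this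
        rw [hpval]
        simp [pvVal, PySem.List.pyGetD_natCast, List.getD_eq_getElem?_getD]
        omega
    have hS : (nums.take m).foldl pvPrefStep (0, none) =
        (((nums.take m).foldl pvPrefStep (0, none)).1, some bm) := by
      rw [← hPstate]
    rw [hS]
    by_cases hse : stack' = []
    · have hlt : bm < x := hempty.mp hse
      rw [if_pos hse]
      simp [pvPrefStep, hlt]
    · have hlt : ¬ bm < x := fun hl => hse (hempty.mpr hl)
      rw [if_neg hse]
      simp [pvPrefStep, hlt]
  unfold pvInv
  refine ⟨?_, ?_, ?_, ?_, ?_, ?_, ?_⟩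
  · -- index range
    intro j hj
    rcases List.mem_cons.mp hj with rfl | hj
    · exact ⟨m, rfl, by omega⟩
    · obtain ⟨k, rfl, hk⟩ := hrange j (hsub' j hj)
      exact ⟨k, rfl, by omega⟩
  · -- head is the last pushed index
    simp only [List.head?_cons, Option.some.injEq]
    push_cast
    ring
  · -- indices strictly decrease
    rw [List.pairwise_cons]
    refine ⟨?_, hs'def ▸ hpi.sublist List.filter_sublist⟩
    intro j hj
    obtain ⟨k, rfl, hk⟩ := hrange j (hsub' j hj)
    exact_mod_cast hk
  · -- values weakly increase toward the bottom
    rw [List.pairwise_cons]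
    refine ⟨?_, hs'def ▸ hpv.sublist List.filter_sublist⟩
    intro j hj
    rw [hxv]
    exact hvge j hj
  · -- the stack dominates the prefix
    intro k hk
    by_cases hkx : pvVal nums (k : Int) ≤ x
    · exact ⟨(m : Int), List.mem_cons_self, by rw [hxv]; exact hkx⟩
    · have hkm : k < m := by
        rcases Nat.lt_succ_iff_lt_or_eq.mp hk with hlt | rfl
        · exact hlt
        · rw [hxv] at hkx; omega
      obtain ⟨j, hj, hle⟩ := hdom k hkm
      have hjmem : j ∈ stack' := by
        rw [hs'def]
        apply List.mem_filter.mpr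
        refine ⟨hj, ?_⟩
        rw [hpval]
        simp only [Bool.not_eq_eq_eq_not, Bool.not_true, decide_eq_false_iff_not]
        omega
      exact ⟨j, List.mem_cons_of_mem _ hjmem, hle⟩
  · -- the stack's values are B's suffix-maxima survivors
    rw [List.map_cons, hxv, htake, List.reverse_append]
    simp only [List.reverse_singleton, List.singleton_append]
    rw [pvSM]
    congr 1
    rw [pvSM_some, ← hmap,
      ← pvMapFilter (pvVal nums) (fun y => decide (x ≤ y)) (h0 :: rest), hs'def]
    congr 1
    apply List.filter_congr
    intro j _
    rw [hpval]
    simp only [Bool.not_eq_eq_eq_not]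
    by_cases hxj : x ≤ pvVal nums j <;> simp [hxj] <;> omega

  · -- the count bookkeeping
    rw [hPsucc, hcount]
    simp only [List.length_cons]
    by_cases hse : stack' = []
    · rw [if_pos hse, if_pos hse]
      push_cast
      omega
    · rw [if_neg hse, if_neg hse]
      push_cast
      omega

lemma pvInv_all (nums : List Int) : ∀ m : Nat, 1 ≤ m → m ≤ nums.length →
    pvInv nums m (pvAState nums m).1 (pvAState nums m).2 := by
  intro m
  induction m with
  | zero => intro h _; omega
  | succ m ih =>
    intro _ hlen
    by_cases hm : 1 ≤ m
    · rw [pvAState_succ]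
      exact pvStep_inv nums m hm (by omega) _ _ (ih hm (by omega))
    · have hm0 : m = 0 := by omega
      subst hm0
      have h1 : pvAState nums 1 = ([0], 0) := by
        unfold pvAState
        have hone : ((1 : Nat) : Int) = 0 + 1 := by norm_num
        rw [hone, PySem.List.pyRange_one_singleton]
        rfl
      rw [h1]
      obtain ⟨y, t, rfl⟩ : ∃ y t, nums = y :: t := by
        cases nums with
        | nil => simp at hlen
        | cons a b => exact ⟨a, b, rfl⟩
      unfold pvInv
      refine ⟨?_, ?_, ?_, ?_, ?_, ?_, ?_⟩
      · intro j hj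
        simp only [List.mem_singleton] at hj
        exact ⟨0, by simp [hj], by omega⟩
      · simp
      · simp
      · simp
      · intro k hk
        have hk0 : k = 0 := by omega
        subst hk0
        exact ⟨0, by simp, le_refl _⟩
      · simp [pvVal, PySem.List.pyGetD_zero_cons, pvSM]
      · simp [pvPrefStep]

-- ===== VERDICT =====
theorem bowlSubarrays_spec : Claim_equal_bowlSubarrays := by
  unfold Claim_equal_bowlSubarrays
  intro nums _
  unfold Spec_bowlSubarrays
  by_cases h0 : nums = []
  · subst h0
    rfl
  · have hn : 1 ≤ nums.length := by
      cases nums with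
      | nil => exact absurd rfl h0
      | cons a b => simp
    obtain ⟨_, _, _, _, _, hmap, hcount⟩ := pvInv_all nums nums.length hn le_rfl
    have htl : nums.take nums.length = nums := List.take_length
    rw [htl] at hmap hcount
    have hSlen : (pvAState nums nums.length).1.length = (pvSM none nums.reverse).length := by
      have := congrArg List.length hmap
      simpa using this
    have hAeq : bowlSubarrays nums = (pvAState nums nums.length).2 := rfl
    rw [hAeq, hcount]
    simp only [bowlSubarrays_alt, if_neg h0]
    rw [pvSuf_fold, hSlen]
    push_cast
    ring
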